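-- pv_equiv track=rewrite | github.com/D-sorganization/Tools | archive/data_processor/archive/CSV_Processor_Rev1.py | _validate_custom_formula
-- ===== SOURCE A (Python) =====
-- def _validate_custom_formula(formula):
--     """Validate the custom formula syntax."""
--     try:
--         # Check for basic mathematical operations and column references
--         allowed_chars = set(
--             "abcdefghijklmnopqrstuvwxyzABCDEFGHIJKLMNOPQRSTUVWXYZ0123456789[]()+-*/. _"
--         )
--         if not all(c in allowed_chars for c in formula):
--             return False
--
--         # Check for balanced brackets
--         if formula.count("[") != formula.count("]"):
--             return False
--
--         return True
--     except:
--         return False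
-- ===== SOURCE B (Python) =====
-- def _validate_custom_formula(formula):
--     """Validate the custom formula syntax (single fused pass)."""
--     try:
--         balance = 0
--         for ch in formula:
--             if not (ch.isalnum() or ch in "[]()+-*/. _"):
--                 return False
--             if ch == "[":
--                 balance += 1
--             elif ch == "]":
--                 balance -= 1
--         return balance == 0
--     except:
--         return False
-- ===== Notes on version B (the rewrite author's own statement) =====
-- stated objective: simpler
-- what changed: Replaces A's three separate scans (an all() over a character set plus two str.count calls) with one fused loop that rejects a disallowed character immediately and maintains a running bracket counter, comparing the net balance to zero at the end.
import Mathlib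
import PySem

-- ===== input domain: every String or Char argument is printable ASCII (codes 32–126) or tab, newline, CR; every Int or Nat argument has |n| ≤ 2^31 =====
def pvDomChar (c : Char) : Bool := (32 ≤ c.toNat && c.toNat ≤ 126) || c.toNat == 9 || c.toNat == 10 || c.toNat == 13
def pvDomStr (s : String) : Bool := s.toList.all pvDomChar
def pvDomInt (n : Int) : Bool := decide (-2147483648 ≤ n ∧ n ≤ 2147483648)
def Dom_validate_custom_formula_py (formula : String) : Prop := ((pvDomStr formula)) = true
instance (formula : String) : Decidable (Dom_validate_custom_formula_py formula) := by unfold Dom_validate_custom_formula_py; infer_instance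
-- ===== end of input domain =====

-- B fuses A's three scans (allowed-chars all() plus two count() calls) into one loop with a running bracket counter; objective: simpler.


-- ===== PORT A =====
-- set("abc…_ ") of allowed characters, as in A
def pvAllowedSet : PySem.Set Char :=
  PySem.Set.ofList "abcdefghijklmnopqrstuvwxyzABCDEFGHIJKLMNOPQRSTUVWXYZ0123456789[]()+-*/. _".toList

def validate_custom_formula_py (formula : String) : Bool :=
  -- if not all(c in allowed_chars for c in formula): return False
  if ¬ (formula.toList.all (fun c => PySem.Set.contains pvAllowedSet c)) then false
  -- if formula.count("[") != formula.count("]"): return False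
  else if PySem.Str.count formula "[" ≠ PySem.Str.count formula "]" then false
  else true

-- ===== PORT B =====
-- not (ch.isalnum() or ch in "[]()+-*/. _")   (exact on the ASCII domain: Char.isAlphanum is ASCII alnum)
def pvAllowedB (c : Char) : Bool := c.isAlphanum || "[]()+-*/. _".toList.contains c

-- the fused loop: early False on a bad char, running bracket balance otherwise
def pvBalLoop : List Char → Int → Bool
  | [], bal => bal == 0
  | c :: rest, bal =>
    if ¬ pvAllowedB c then false
    else pvBalLoop rest (bal + (if c = '[' then 1 else if c = ']' then -1 else 0))

def validate_custom_formula_py_alt (formula : String) : Bool :=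
  pvBalLoop formula.toList 0

-- ===== PRECONDITION & SPEC =====
def Spec_validate_custom_formula_py (formula : String) (out : Bool) : Prop := out = validate_custom_formula_py_alt formula
instance (formula : String) (out : Bool) : Decidable (Spec_validate_custom_formula_py formula out) := by unfold Spec_validate_custom_formula_py; infer_instance

-- ===== CLAIM (what is proved, stated in full; the proofs are below) =====
def Claim_equal_validate_custom_formula_py : Prop := ∀ (formula : String), Dom_validate_custom_formula_py formula → Spec_validate_custom_formula_py formula (validate_custom_formula_py formula)

-- ===== LEMMAS AND PROOFS =====

-- all is determined by the predicate's values on the members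
theorem pv_all_congr_mem {α : Type} {p q : α → Bool} : ∀ (l : List α),
    (∀ x ∈ l, p x = q x) → l.all p = l.all q := by
  intro l
  induction l with
  | nil => intro _; rfl
  | cons h t ih =>
    intro hx
    simp only [List.all_cons]
    rw [hx h (by simp), ih (fun x hm => hx x (by simp [hm]))]

-- single-character substring count is list count
theorem pv_count_go_single (c : Char) : ∀ (l : List Char) (fuel acc : Nat), l.length ≤ fuel →
    PySem.Chars.count.go [c] fuel l acc = acc + l.count c := by
  intro l
  induction l with
  | nil =>
    intro fuel acc _
    cases fuel <;> rw [PySem.Chars.count.go] <;> simp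
  | cons h t ih =>
    intro fuel acc hle
    cases fuel with
    | zero => simp at hle
    | succ f =>
      rw [PySem.Chars.count.go]
      have hlf : t.length ≤ f := by simp at hle; omega
      by_cases hc : c = h
      · have hpre : List.isPrefixOf [c] (h :: t) = true := by simp [List.isPrefixOf, hc]
        simp only [hpre, if_pos, List.length_singleton, List.drop_one, List.tail_cons]
        rw [ih f (acc + 1) hlf]
        simp [hc.symm]
        omega
      · have hpre : List.isPrefixOf [c] (h :: t) = false := by simp [List.isPrefixOf, hc]
        simp only [hpre, Bool.false_eq_true, if_false]
        rw [ih f acc hlf]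
        have : (h == c) = false := by simp [Ne.symm hc]
        simp [List.count_cons, this]

theorem pv_chars_count_single (c : Char) (l : List Char) :
    PySem.Chars.count l [c] = l.count c := by
  have h := pv_count_go_single c l l.length 0 (le_refl _)
  simp only [PySem.Chars.count, List.isEmpty, reduceCtorEq, if_false]
  omega

-- the two allowed-character tests agree on the ASCII domain
set_option maxRecDepth 8000 in
theorem pv_allowed_agree (c : Char) (hd : pvDomChar c = true) :
    PySem.Set.contains pvAllowedSet c = pvAllowedB c := by
  revert hd
  unfold pvDomChar
  have h1 : ∀ n : Nat, n < 127 →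
      PySem.Set.contains pvAllowedSet (Char.ofNat n) = pvAllowedB (Char.ofNat n) := by decide
  intro hd
  have hlt : c.toNat < 127 := by
    simp only [Bool.or_eq_true, Bool.and_eq_true, decide_eq_true_eq, beq_iff_eq] at hd
    omega
  have := h1 c.toNat hlt
  rwa [Char.ofNat_toNat] at this

-- characterisation of the fused loop in terms of bracket counts
theorem pv_balLoop_eq (l : List Char) : ∀ (bal : Int),
    pvBalLoop l bal =
      (l.all pvAllowedB && (bal + ((l.count '[' : Int) - (l.count ']' : Int)) == 0)) := by
  induction l with
  | nil => intro bal; simp [pvBalLoop]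
  | cons c t ih =>
    intro bal
    simp only [pvBalLoop, List.all_cons]
    by_cases hc : pvAllowedB c
    · rw [if_neg (by simp [hc]), ih, hc, Bool.true_and]
      have key : (bal + (if c = '[' then (1:Int) else if c = ']' then -1 else 0))
            + ((t.count '[' : Int) - (t.count ']' : Int))
          = bal + (((c :: t).count '[' : Int) - ((c :: t).count ']' : Int)) := by
        by_cases h1 : c = '['
        · subst h1; simp; ring
        · by_cases h2 : c = ']'
          · subst h2; simp [h1]; ring
          · have e1 : ('[' == c) = false := by simp [Ne.symm h1]
            have e2 : (']' == c) = false := by simp [Ne.symm h2]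
            simp [h1, h2]
      rw [key]
    · simp [hc]

-- ===== VERDICT (by name: the statement is the Claim_ definition above) =====
theorem validate_custom_formula_py_spec : Claim_equal_validate_custom_formula_py := by
  intro formula hdom
  unfold Spec_validate_custom_formula_py validate_custom_formula_py validate_custom_formula_py_alt
  rw [pv_balLoop_eq]
  have hall : formula.toList.all (fun c => PySem.Set.contains pvAllowedSet c)
            = formula.toList.all pvAllowedB := by
    apply pv_all_congr_mem
    intro c hc
    apply pv_allowed_agree
    unfold Dom_validate_custom_formula_py pvDomStr at hdom
    exact List.all_eq_true.mp hdom c hc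
  have e1 : PySem.Str.count formula "[" = formula.toList.count '[' := by
    rw [PySem.Str.count_eq, (by decide : ("[" : String).toList = ['['])]
    exact pv_chars_count_single '[' formula.toList
  have e2 : PySem.Str.count formula "]" = formula.toList.count ']' := by
    rw [PySem.Str.count_eq, (by decide : ("]" : String).toList = [']'])]
    exact pv_chars_count_single ']' formula.toList
  by_cases h : formula.toList.all pvAllowedB
  · rw [if_neg (by rw [hall]; simp [h]), h, Bool.true_and]
    split_ifs with h2
    · symm
      simp only [beq_eq_false_iff_ne, ne_eq]
      intro hc
      apply h2
      rw [e1, e2]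
      omega
    · symm
      simp only [beq_iff_eq]
      rw [e1, e2] at h2
      omega
  · simp only [Bool.not_eq_true] at h
    rw [if_pos (by rw [hall, h]; simp), h, Bool.false_and]
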